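-- pv_equiv track=rewrite | github.com/betterzian/PrivacyGuard | privacyguard/infrastructure/pii/detector/models.py | build_negative_unit_index
-- ===== SOURCE A (Python) =====
-- from collections.abc import Sequence
--
-- def _normalize_negative_unit_range(unit_count: int, unit_start: int, unit_end: int) -> tuple[int, int]:
--     """裁剪 negative 查询区间，统一转成合法的半开区间。"""
--     if unit_count <= 0:
--         return (0, 0)
--     start = max(0, min(unit_count, int(unit_start)))
--     end = max(0, min(unit_count, int(unit_end)))
--     if end <= start:
--         return (start, start)
--     return (start, end)
--
-- def build_negative_unit_index(
--     unit_count: int,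
--     unit_spans: Sequence[tuple[int, int]],
-- ) -> tuple[list[int], list[int], int]:
--     """按 unit 区间构建 negative 覆盖索引与前缀和。"""
--     safe_unit_count = max(0, int(unit_count))
--     start_weight = safe_unit_count + 1
--     marks = [0] * safe_unit_count
--     for raw_start, raw_end in unit_spans:
--         start, end = _normalize_negative_unit_range(safe_unit_count, raw_start, raw_end)
--         if end <= start:
--             continue
--         marks[start] = max(marks[start], start_weight)
--         for unit_index in range(start + 1, end):
--             if marks[unit_index] < start_weight:
--                 marks[unit_index] = 1
--
--     prefix_sum = [0]
--     running = 0
--     for mark in marks: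
--         running += mark
--         prefix_sum.append(running)
--     return marks, prefix_sum, start_weight
-- ===== SOURCE B (Python) =====
-- def build_negative_unit_index(unit_count, unit_spans):
--     """Difference array for interior coverage + a start-index set; marks from a single pass over units."""
--     n = max(0, int(unit_count))
--     sw = n + 1
--     diff = [0] * (n + 1)
--     starts = set()
--     for raw_start, raw_end in unit_spans:
--         s = max(0, min(n, int(raw_start)))
--         e = max(0, min(n, int(raw_end)))
--         if e <= s:
--             continue
--         starts.add(s)
--         if s + 1 < e:
--             diff[s + 1] += 1
--             diff[e] -= 1
--     marks = []
--     cov = 0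
--     for i in range(n):
--         cov += diff[i]
--         marks.append(sw if i in starts else (1 if cov > 0 else 0))
--     prefix_sum = [0]
--     running = 0
--     for mark in marks:
--         running += mark
--         prefix_sum.append(running)
--     return marks, prefix_sum, sw
-- ===== Notes on version B (the rewrite author's own statement) =====
-- stated objective: alternative
-- what changed: Replaces A's per-span interior write loop (A revisits every covered cell per span) by a difference array for interior coverage plus a set of start indices, with marks produced in a single pass over the units; measured overall cost is comparable because the common prefix-sum pass dominates.
import Mathlib
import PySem

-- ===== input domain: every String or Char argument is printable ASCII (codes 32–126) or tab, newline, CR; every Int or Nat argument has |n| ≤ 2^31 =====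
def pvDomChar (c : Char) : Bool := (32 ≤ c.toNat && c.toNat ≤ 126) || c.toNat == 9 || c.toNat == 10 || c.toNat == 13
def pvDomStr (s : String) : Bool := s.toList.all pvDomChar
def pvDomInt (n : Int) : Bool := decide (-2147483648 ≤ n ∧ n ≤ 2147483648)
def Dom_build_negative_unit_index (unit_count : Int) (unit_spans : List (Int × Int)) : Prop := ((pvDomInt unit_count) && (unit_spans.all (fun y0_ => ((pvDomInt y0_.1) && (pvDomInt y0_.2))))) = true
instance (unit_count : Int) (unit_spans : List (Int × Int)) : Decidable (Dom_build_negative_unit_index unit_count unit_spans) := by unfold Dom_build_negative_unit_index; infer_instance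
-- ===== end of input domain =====

-- B replaces A's per-span interior write loop by a difference array + start-index set and a single
-- pass over the units (objective: alternative). Both ports return the same triple; prefix sums are
-- built by the identical final loop in both Pythons, shared here as the helper pvPrefix.

-- ===== PORT A =====
-- port of _normalize_negative_unit_range (the Python locals start/end are inlined)
def pvNorm (unit_count unit_start unit_end : Int) : Int × Int :=
  if unit_count ≤ 0 then (0, 0)
  else if max 0 (min unit_count unit_end) ≤ max 0 (min unit_count unit_start) then
    (max 0 (min unit_count unit_start), max 0 (min unit_count unit_start))
  else (max 0 (min unit_count unit_start), max 0 (min unit_count unit_end))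

-- body of A's `for raw_start, raw_end in unit_spans` loop (indices are always in range: 0 ≤ s < e ≤ n)
def pvStepA (n sw : Int) (marks : List Int) (p : Int × Int) : List Int :=
  if (pvNorm n p.1 p.2).2 ≤ (pvNorm n p.1 p.2).1 then marks
  else
    (PySem.List.pyRange ((pvNorm n p.1 p.2).1 + 1) (pvNorm n p.1 p.2).2 1).foldl
      (fun m j => if PySem.List.pyGetD m j 0 < sw then PySem.List.pySetD m j 1 else m)
      (PySem.List.pySetD marks (pvNorm n p.1 p.2).1
        (max (PySem.List.pyGetD marks (pvNorm n p.1 p.2).1 0) sw))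

-- the prefix_sum loop (textually identical in A and in Source B)
def pvPrefix (marks : List Int) : List Int :=
  (marks.foldl (fun (acc : List Int × Int) mk => (acc.1 ++ [acc.2 + mk], acc.2 + mk)) ([0], 0)).1

def build_negative_unit_index (unit_count : Int) (unit_spans : List (Int × Int)) :
    List Int × List Int × Int :=
  let n := max 0 unit_count
  let sw := n + 1
  let marks := unit_spans.foldl (pvStepA n sw) (List.replicate n.toNat 0)
  (marks, pvPrefix marks, sw)

-- ===== PORT B =====
-- body of B's span loop: clamp, record the start, bump the interior difference array
def pvStepB (n : Int) (st : List Int × PySem.Set Int) (p : Int × Int) : List Int × PySem.Set Int :=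
  if max 0 (min n p.2) ≤ max 0 (min n p.1) then st
  else if max 0 (min n p.1) + 1 < max 0 (min n p.2) then
    (PySem.List.pySetD
      (PySem.List.pySetD st.1 (max 0 (min n p.1) + 1)
        (PySem.List.pyGetD st.1 (max 0 (min n p.1) + 1) 0 + 1))
      (max 0 (min n p.2))
      (PySem.List.pyGetD
        (PySem.List.pySetD st.1 (max 0 (min n p.1) + 1)
          (PySem.List.pyGetD st.1 (max 0 (min n p.1) + 1) 0 + 1))
        (max 0 (min n p.2)) 0 - 1),
     PySem.Set.add st.2 (max 0 (min n p.1)))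
  else (st.1, PySem.Set.add st.2 (max 0 (min n p.1)))

-- B's single pass producing the marks (running coverage + start-set lookup)
def pvMarksB (n sw : Int) (diff : List Int) (starts : PySem.Set Int) : List Int :=
  ((PySem.List.pyRange 0 n 1).foldl
    (fun (st : List Int × Int) i =>
      (st.1 ++ [if PySem.Set.contains starts i then sw
                else if 0 < st.2 + PySem.List.pyGetD diff i 0 then 1 else 0],
       st.2 + PySem.List.pyGetD diff i 0))
    ([], 0)).1

def build_negative_unit_index_alt (unit_count : Int) (unit_spans : List (Int × Int)) :
    List Int × List Int × Int :=
  let n := max 0 unit_count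
  let sw := n + 1
  let st := unit_spans.foldl (pvStepB n) (List.replicate (n.toNat + 1) 0, PySem.Set.empty)
  let marks := pvMarksB n sw st.1 st.2
  (marks, pvPrefix marks, sw)

-- ===== PRECONDITION & SPEC =====
def Spec_build_negative_unit_index (unit_count : Int) (unit_spans : List (Int × Int)) (out : List Int × List Int × Int) : Prop := out = build_negative_unit_index_alt unit_count unit_spans
instance (unit_count : Int) (unit_spans : List (Int × Int)) (out : List Int × List Int × Int) : Decidable (Spec_build_negative_unit_index unit_count unit_spans out) := by unfold Spec_build_negative_unit_index; infer_instance

-- ===== CLAIM (what is proved, stated in full; the proofs are below) =====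
def Claim_equal_build_negative_unit_index : Prop := ∀ (unit_count : Int) (unit_spans : List (Int × Int)), Dom_build_negative_unit_index unit_count unit_spans → Spec_build_negative_unit_index unit_count unit_spans (build_negative_unit_index unit_count unit_spans)

-- ===== LEMMAS AND PROOFS =====

-- common characterisation of the final marks: index i carries sw if it is the start of some
-- nonempty clamped span, else 1 if it is interior to some clamped span, else 0.
def pvS (n : Int) (p : Int × Int) : Int := max 0 (min n p.1)
def pvE (n : Int) (p : Int × Int) : Int := max 0 (min n p.2)

def pvStartB (n : Int) (spans : List (Int × Int)) (i : Int) : Bool :=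
  spans.any (fun p => decide (pvS n p = i ∧ pvS n p < pvE n p))
def pvIntB (n : Int) (spans : List (Int × Int)) (i : Int) : Bool :=
  spans.any (fun p => decide (pvS n p + 1 ≤ i ∧ i < pvE n p))

def pvSpec (n sw : Int) (spans : List (Int × Int)) (i : Int) : Int :=
  if pvStartB n spans i then sw else if pvIntB n spans i then 1 else 0

lemma pvSpec_cases (n sw : Int) (spans : List (Int × Int)) (i : Int) :
    pvSpec n sw spans i = sw ∨ pvSpec n sw spans i = 1 ∨ pvSpec n sw spans i = 0 := by
  unfold pvSpec; split_ifs <;> simp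

lemma pvS_nonneg (n : Int) (p : Int × Int) : 0 ≤ pvS n p := le_max_left _ _
lemma pvE_nonneg (n : Int) (p : Int × Int) : 0 ≤ pvE n p := le_max_left _ _
lemma pvE_le (n : Int) (p : Int × Int) (hn : 0 ≤ n) : pvE n p ≤ n := by unfold pvE; omega

lemma pvStartB_append (n : Int) (l : List (Int × Int)) (p : Int × Int) (i : Int) :
    pvStartB n (l ++ [p]) i
      = (pvStartB n l i || decide (pvS n p = i ∧ pvS n p < pvE n p)) := by
  unfold pvStartB; simp [List.any_append]

lemma pvIntB_append (n : Int) (l : List (Int × Int)) (p : Int × Int) (i : Int) :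
    pvIntB n (l ++ [p]) i
      = (pvIntB n l i || decide (pvS n p + 1 ≤ i ∧ i < pvE n p)) := by
  unfold pvIntB; simp [List.any_append]

lemma getD_replicate_zero (n k : Nat) : (List.replicate n (0 : Int)).getD k 0 = 0 := by
  simp [List.getD_eq_getElem?_getD, List.getElem?_replicate]; split <;> rfl

lemma getD_set_self (l : List Int) (i : Nat) (v : Int) (h : i < l.length) :
    (l.set i v).getD i 0 = v := by
  simp [List.getD_eq_getElem?_getD, h]

lemma getD_set_ne (l : List Int) (i k : Nat) (v : Int) (h : i ≠ k) :
    (l.set i v).getD k 0 = l.getD k 0 := by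
  simp [List.getD_eq_getElem?_getD, h]

lemma set_contains_add (s : PySem.Set Int) (x y : Int) :
    PySem.Set.contains (PySem.Set.add s y) x = (PySem.Set.contains s x || decide (x = y)) := by
  simp [PySem.Set.contains, PySem.Set.mem_add]

-- ---- A side ----

lemma innerA_len (sw : Int) (rs : List Int) : ∀ m : List Int,
    (rs.foldl (fun m j => if PySem.List.pyGetD m j 0 < sw then PySem.List.pySetD m j 1 else m) m).length
      = m.length := by
  induction rs with
  | nil => intro m; rfl
  | cons r rs ih =>
    intro m
    rw [List.foldl_cons, ih]
    split <;> simp [PySem.List.length_pySetD]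

lemma stepA_len (n sw : Int) (m : List Int) (p : Int × Int) :
    (pvStepA n sw m p).length = m.length := by
  unfold pvStepA
  split
  · rfl
  · rw [innerA_len]; simp [PySem.List.length_pySetD]

lemma innerA (sw : Int) :
    ∀ (fuel : Nat) (a b : Int) (m : List Int), (b - a).toNat = fuel → 0 ≤ a →
      b ≤ (m.length : Int) → ∀ (k : Nat),
      ((PySem.List.pyRange a b 1).foldl
        (fun m j => if PySem.List.pyGetD m j 0 < sw then PySem.List.pySetD m j 1 else m) m).getD k 0
      = if a ≤ (k : Int) ∧ (k : Int) < b then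
          (if m.getD k 0 < sw then 1 else m.getD k 0) else m.getD k 0 := by
  intro fuel
  induction fuel with
  | zero =>
    intro a b m hf h0 hb k
    rw [PySem.List.pyRange_one_eq_nil (by omega), List.foldl_nil,
        if_neg (show ¬ (a ≤ (k : Int) ∧ (k : Int) < b) by omega)]
  | succ f ih =>
    intro a b m hf h0 hb k
    have hab : a < b := by omega
    have hal : a.toNat < m.length := by omega
    rw [PySem.List.pyRange_one_cons hab, List.foldl_cons]
    have hga : PySem.List.pyGetD m a 0 = m.getD a.toNat 0 := by
      rw [PySem.List.pyGetD_eq_getElem m 0 h0 (by omega), List.getD_eq_getElem m 0 hal]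
    have hset1 : PySem.List.pySetD m a 1 = m.set a.toNat 1 :=
      PySem.List.pySetD_of_nonneg m 1 h0
    set m' := if PySem.List.pyGetD m a 0 < sw then PySem.List.pySetD m a 1 else m with hm'
    have hlen' : m'.length = m.length := by
      rw [hm']; split <;> simp [PySem.List.length_pySetD]
    have hgd : ∀ k2 : Nat, m'.getD k2 0
        = if (k2 : Int) = a then (if m.getD k2 0 < sw then 1 else m.getD k2 0)
          else m.getD k2 0 := by
      intro k2
      rw [hm', hga]
      by_cases hk2 : (k2 : Int) = a
      · have hk2' : k2 = a.toNat := by omega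
        subst hk2'
        rw [if_pos hk2]
        by_cases hc : m.getD a.toNat 0 < sw
        · rw [if_pos hc, if_pos hc, hset1, getD_set_self m a.toNat 1 hal]
        · rw [if_neg hc, if_neg hc]
      · rw [if_neg hk2]
        split
        · rw [hset1, getD_set_ne m a.toNat k2 1 (by omega)]
        · rfl
    rw [ih (a + 1) b m' (by omega) (by omega) (by rw [hlen']; exact hb) k, hgd k]
    by_cases hka : (k : Int) = a
    · rw [if_pos hka, if_neg (show ¬ (a + 1 ≤ (k : Int) ∧ (k : Int) < b) by omega),
          if_pos (show a ≤ (k : Int) ∧ (k : Int) < b by omega)]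
    · rw [if_neg hka]
      by_cases hin : a + 1 ≤ (k : Int) ∧ (k : Int) < b
      · rw [if_pos hin, if_pos (show a ≤ (k : Int) ∧ (k : Int) < b by omega)]
      · rw [if_neg hin, if_neg (show ¬ (a ≤ (k : Int) ∧ (k : Int) < b) by omega)]

lemma stepA_char (n : Int) (l : List (Int × Int)) (p : Int × Int) (marks : List Int)
    (hn : 0 ≤ n) (hlen : marks.length = n.toNat)
    (hm : ∀ k : Nat, k < n.toNat → marks.getD k 0 = pvSpec n (n + 1) l (k : Int)) :
    ∀ k : Nat, k < n.toNat →
      (pvStepA n (n + 1) marks p).getD k 0 = pvSpec n (n + 1) (l ++ [p]) (k : Int) := by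
  intro k hk
  have hn0 : 0 < n := by omega
  obtain ⟨s, hs⟩ : ∃ s, pvS n p = s := ⟨_, rfl⟩
  obtain ⟨e, he⟩ : ∃ e, pvE n p = e := ⟨_, rfl⟩
  have hs0 : 0 ≤ s := hs ▸ pvS_nonneg n p
  have hen : e ≤ n := he ▸ pvE_le n p hn
  have hnorm : pvNorm n p.1 p.2 = if e ≤ s then (s, s) else (s, e) := by
    unfold pvS at hs; unfold pvE at he
    unfold pvNorm
    rw [if_neg (show ¬ n ≤ 0 by omega), hs, he]
  by_cases hse : e ≤ s
  · have hstep : pvStepA n (n + 1) marks p = marks := by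
      unfold pvStepA
      rw [hnorm, if_pos hse]
      simp
    rw [hstep, hm k hk]
    unfold pvSpec
    rw [pvStartB_append, pvIntB_append, hs, he]
    rw [show decide (s = (k : Int) ∧ s < e) = false by simp; omega]
    rw [show decide (s + 1 ≤ (k : Int) ∧ (k : Int) < e) = false by simp; omega]
    simp
  · have hse' : s < e := by omega
    have hstep : pvStepA n (n + 1) marks p
        = (PySem.List.pyRange (s + 1) e 1).foldl
            (fun m j => if PySem.List.pyGetD m j 0 < n + 1 then PySem.List.pySetD m j 1 else m)
            (PySem.List.pySetD marks s (max (PySem.List.pyGetD marks s 0) (n + 1))) := by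
      unfold pvStepA
      rw [hnorm, if_neg hse, if_neg (by simpa using hse)]
    have hsk : s.toNat < n.toNat := by omega
    have hsl : s.toNat < marks.length := by omega
    have hgs : PySem.List.pyGetD marks s 0 = marks.getD s.toNat 0 := by
      rw [PySem.List.pyGetD_eq_getElem marks 0 hs0 (by omega), List.getD_eq_getElem marks 0 hsl]
    have hval : marks.getD s.toNat 0 ≤ n + 1 := by
      rw [hm s.toNat hsk]
      rcases pvSpec_cases n (n + 1) l ((s.toNat : Nat) : Int) with h | h | h <;> omega
    have hmax : max (PySem.List.pyGetD marks s 0) (n + 1) = n + 1 := by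
      rw [hgs]; omega
    rw [hstep, hmax]
    set m1 := PySem.List.pySetD marks s (n + 1) with hm1def
    have hset1 : m1 = marks.set s.toNat (n + 1) := PySem.List.pySetD_of_nonneg marks (n + 1) hs0
    have hm1len : m1.length = marks.length := by rw [hset1]; simp
    have hm1 : ∀ k2 : Nat, m1.getD k2 0
        = if (k2 : Int) = s then n + 1 else marks.getD k2 0 := by
      intro k2
      rw [hset1]
      by_cases hk2 : (k2 : Int) = s
      · have hk2' : k2 = s.toNat := by omega
        subst hk2'
        rw [if_pos hk2, getD_set_self marks s.toNat _ hsl]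
      · rw [if_neg hk2, getD_set_ne marks s.toNat k2 _ (by omega)]
    have hblen : e ≤ (m1.length : Int) := by rw [hm1len, hlen]; omega
    rw [innerA (n + 1) (e - (s + 1)).toNat (s + 1) e m1 rfl (by omega) hblen k, hm1 k]
    unfold pvSpec
    rw [pvStartB_append, pvIntB_append, hs, he]
    by_cases hks : (k : Int) = s
    · rw [if_pos hks, if_neg (show ¬ (s + 1 ≤ (k : Int) ∧ (k : Int) < e) by omega)]
      rw [show decide (s = (k : Int) ∧ s < e) = true by simp; omega]
      simp
    · rw [if_neg hks]
      by_cases hin : s + 1 ≤ (k : Int) ∧ (k : Int) < e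
      · rw [if_pos hin, hm k hk]
        rw [show decide (s = (k : Int) ∧ s < e) = false by simp; omega]
        rw [show decide (s + 1 ≤ (k : Int) ∧ (k : Int) < e) = true by simp; omega]
        unfold pvSpec
        cases hSB : pvStartB n l (k : Int) <;> cases hIB : pvIntB n l (k : Int) <;>
          simp only [Bool.or_true, Bool.or_false, if_true] <;> split_ifs <;> first | rfl | omega
      · rw [if_neg hin, hm k hk]
        rw [show decide (s = (k : Int) ∧ s < e) = false by simp; omega]
        rw [show decide (s + 1 ≤ (k : Int) ∧ (k : Int) < e) = false by simp; omega]
        simp [pvSpec]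

lemma marksA_char (n : Int) (hn : 0 ≤ n) (spans : List (Int × Int)) :
    spans.foldl (pvStepA n (n + 1)) (List.replicate n.toNat 0)
      = (List.range n.toNat).map (fun (k : Nat) => pvSpec n (n + 1) spans (k : Int)) := by
  have main : ∀ l : List (Int × Int),
      (l.foldl (pvStepA n (n + 1)) (List.replicate n.toNat 0)).length = n.toNat
      ∧ ∀ k : Nat, k < n.toNat →
        (l.foldl (pvStepA n (n + 1)) (List.replicate n.toNat 0)).getD k 0
          = pvSpec n (n + 1) l (k : Int) := by
    intro l
    induction l using List.reverseRecOn with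
    | nil =>
      refine ⟨by simp, fun k hk => ?_⟩
      rw [List.foldl_nil, getD_replicate_zero]
      unfold pvSpec pvStartB pvIntB
      simp
    | append_singleton l p ih =>
      rw [List.foldl_append, List.foldl_cons, List.foldl_nil]
      exact ⟨by rw [stepA_len]; exact ih.1, stepA_char n l p _ hn ih.1 ih.2⟩
  apply List.ext_getElem
  · rw [(main spans).1]; simp
  · intro k h1 h2
    have hk : k < n.toNat := by rw [← (main spans).1]; exact h1
    have hgd := (main spans).2 k hk
    rw [List.getD_eq_getElem _ _ h1] at hgd
    rw [hgd, List.getElem_map, List.getElem_range]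

-- ---- B side ----

def pvContrib (n : Int) (p : Int × Int) (j : Nat) : Int :=
  if pvS n p < pvE n p ∧ pvS n p + 1 < pvE n p then
    (if pvS n p + 1 = (j : Int) then 1 else 0) - (if pvE n p = (j : Int) then 1 else 0)
  else 0

def pvDSpec (n : Int) (l : List (Int × Int)) (j : Nat) : Int :=
  (l.map (fun p => pvContrib n p j)).sum

lemma pvDSpec_append (n : Int) (l : List (Int × Int)) (p : Int × Int) (j : Nat) :
    pvDSpec n (l ++ [p]) j = pvDSpec n l j + pvContrib n p j := by
  simp [pvDSpec]

lemma stateB_char (n : Int) (hn : 0 ≤ n) (l : List (Int × Int)) :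
    (l.foldl (pvStepB n) (List.replicate (n.toNat + 1) 0, PySem.Set.empty)).1.length = n.toNat + 1
    ∧ (∀ j : Nat, (l.foldl (pvStepB n) (List.replicate (n.toNat + 1) 0, PySem.Set.empty)).1.getD j 0
        = pvDSpec n l j)
    ∧ (∀ x : Int, PySem.Set.contains
        (l.foldl (pvStepB n) (List.replicate (n.toNat + 1) 0, PySem.Set.empty)).2 x
        = pvStartB n l x) := by
  induction l using List.reverseRecOn with
  | nil =>
    refine ⟨by simp, fun j => ?_, fun x => ?_⟩
    · rw [List.foldl_nil]
      show (List.replicate (n.toNat + 1) (0 : Int)).getD j 0 = _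
      rw [getD_replicate_zero]
      simp [pvDSpec]
    · rw [List.foldl_nil]
      show PySem.Set.contains PySem.Set.empty x = _
      unfold pvStartB
      simp [PySem.Set.empty, PySem.Set.contains]
  | append_singleton l p ih =>
    obtain ⟨ih1, ih2, ih3⟩ := ih
    rw [List.foldl_append, List.foldl_cons, List.foldl_nil]
    set st := l.foldl (pvStepB n) (List.replicate (n.toNat + 1) 0, PySem.Set.empty) with hst
    obtain ⟨s, hs⟩ : ∃ s, pvS n p = s := ⟨_, rfl⟩
    obtain ⟨e, he⟩ : ∃ e, pvE n p = e := ⟨_, rfl⟩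
    have hs0 : 0 ≤ s := hs ▸ pvS_nonneg n p
    have he0 : 0 ≤ e := he ▸ pvE_nonneg n p
    have hen : e ≤ n := he ▸ pvE_le n p hn
    have hsM : max 0 (min n p.1) = s := by rw [← hs]; rfl
    have heM : max 0 (min n p.2) = e := by rw [← he]; rfl
    have hstep : pvStepB n st p
        = if e ≤ s then st
          else if s + 1 < e then
            (PySem.List.pySetD
              (PySem.List.pySetD st.1 (s + 1) (PySem.List.pyGetD st.1 (s + 1) 0 + 1))
              e (PySem.List.pyGetD
                  (PySem.List.pySetD st.1 (s + 1) (PySem.List.pyGetD st.1 (s + 1) 0 + 1)) e 0 - 1),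
             PySem.Set.add st.2 s)
          else (st.1, PySem.Set.add st.2 s) := by
      unfold pvStepB
      rw [hsM, heM]
    by_cases hse : e ≤ s
    · rw [hstep, if_pos hse]
      refine ⟨ih1, fun j => ?_, fun x => ?_⟩
      · rw [ih2 j, pvDSpec_append]
        unfold pvContrib
        rw [hs, he, if_neg (show ¬ (s < e ∧ s + 1 < e) by omega)]
        ring
      · rw [ih3 x, pvStartB_append, hs, he]
        rw [show decide (s = x ∧ s < e) = false by simp; omega]
        simp
    · have hse' : s < e := by omega
      have hcontains : ∀ x : Int,
          PySem.Set.contains (PySem.Set.add st.2 s) x = pvStartB n (l ++ [p]) x := by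
        intro x
        rw [set_contains_add, ih3 x, pvStartB_append, hs, he]
        rw [show decide (s = x ∧ s < e) = decide (x = s) by
          by_cases hx : x = s
          · simp [hx, hse']
          · simp [hx]; omega]
      by_cases hs1 : s + 1 < e
      · rw [hstep, if_neg hse, if_pos hs1]
        have hs1lt : (s + 1).toNat < n.toNat + 1 := by omega
        have helt : e.toNat < n.toNat + 1 := by omega
        set d := st.1 with hd
        have hd1 : PySem.List.pySetD d (s + 1) (PySem.List.pyGetD d (s + 1) 0 + 1)
            = d.set (s + 1).toNat (d.getD (s + 1).toNat 0 + 1) := by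
          rw [PySem.List.pySetD_of_nonneg d _ (by omega),
              PySem.List.pyGetD_eq_getElem d 0 (by omega) (by rw [ih1]; push_cast; omega),
              List.getD_eq_getElem d 0 (by omega)]
        set d1 := d.set (s + 1).toNat (d.getD (s + 1).toNat 0 + 1) with hd1def
        have hd1len : d1.length = n.toNat + 1 := by rw [hd1def]; simp [ih1]
        have hd1g : ∀ j : Nat, d1.getD j 0
            = if j = (s + 1).toNat then d.getD j 0 + 1 else d.getD j 0 := by
          intro j
          by_cases hj : j = (s + 1).toNat
          · subst hj
            rw [if_pos rfl, hd1def, getD_set_self d _ _ (by omega)]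
          · rw [if_neg hj, hd1def, getD_set_ne d _ _ _ (fun h => hj h.symm)]
        have hd2 : PySem.List.pySetD d1 e (PySem.List.pyGetD d1 e 0 - 1)
            = d1.set e.toNat (d1.getD e.toNat 0 - 1) := by
          rw [PySem.List.pySetD_of_nonneg d1 _ he0,
              PySem.List.pyGetD_eq_getElem d1 0 he0 (by rw [hd1len]; push_cast; omega),
              List.getD_eq_getElem d1 0 (by omega)]
        refine ⟨?_, fun j => ?_, hcontains⟩
        · rw [hd1, hd2]; simp [hd1len]
        · rw [hd1, hd2]
          have hd2g : (d1.set e.toNat (d1.getD e.toNat 0 - 1)).getD j 0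
              = if j = e.toNat then d1.getD j 0 - 1 else d1.getD j 0 := by
            by_cases hj : j = e.toNat
            · subst hj
              rw [if_pos rfl, getD_set_self d1 _ _ (by omega)]
            · rw [if_neg hj, getD_set_ne d1 _ _ _ (fun h => hj h.symm)]
          rw [hd2g, hd1g j, pvDSpec_append, ih2 j]
          unfold pvContrib
          rw [hs, he, if_pos (show s < e ∧ s + 1 < e by omega)]
          by_cases hj1 : j = (s + 1).toNat
          · rw [if_pos hj1, if_pos (show s + 1 = (j : Int) by omega),
                if_neg (show ¬ e = (j : Int) by omega),
                if_neg (show ¬ j = e.toNat by omega)]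
            ring
          · rw [if_neg hj1, if_neg (show ¬ s + 1 = (j : Int) by omega)]
            by_cases hj2 : j = e.toNat
            · rw [if_pos hj2, if_pos (show e = (j : Int) by omega)]
              ring
            · rw [if_neg hj2, if_neg (show ¬ e = (j : Int) by omega)]
              ring
      · rw [hstep, if_neg hse, if_neg hs1]
        refine ⟨ih1, fun j => ?_, hcontains⟩
        rw [ih2 j, pvDSpec_append]
        unfold pvContrib
        rw [hs, he, if_neg (show ¬ (s < e ∧ s + 1 < e) by omega)]
        ring

lemma sum_range_ite (t v : Int) (ht : 0 ≤ t) :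
    ∀ m : Nat, ((List.range m).map (fun (k : Nat) => if t = (k : Int) then v else 0)).sum
      = if t < (m : Int) then v else 0 := by
  intro m
  induction m with
  | zero => simp; omega
  | succ m ih =>
    rw [List.range_succ, List.map_append, List.sum_append, ih]
    simp only [List.map_cons, List.map_nil, List.sum_cons, List.sum_nil, add_zero]
    push_cast
    split_ifs <;> omega

lemma sum_contrib_eq_ind (n : Int) (p : Int × Int) (m : Nat) :
    ((List.range (m + 1)).map (fun (k : Nat) => pvContrib n p k)).sum
      = (if pvS n p + 1 ≤ (m : Int) ∧ (m : Int) < pvE n p then (1 : Int) else 0) := by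
  have hs0 : 0 ≤ pvS n p := pvS_nonneg n p
  have he0 : 0 ≤ pvE n p := pvE_nonneg n p
  by_cases hg : pvS n p < pvE n p ∧ pvS n p + 1 < pvE n p
  · have hfun : ∀ k ∈ List.range (m + 1), pvContrib n p k
        = (if pvS n p + 1 = (k : Int) then (1 : Int) else 0)
          + (if pvE n p = (k : Int) then (-1 : Int) else 0) := by
      intro k _
      unfold pvContrib
      rw [if_pos hg]
      split_ifs <;> ring
    rw [List.map_congr_left hfun, PySem.List.sum_map_add_int,
        sum_range_ite (pvS n p + 1) 1 (by omega) (m + 1),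
        sum_range_ite (pvE n p) (-1) he0 (m + 1)]
    push_cast
    split_ifs <;> omega
  · have hfun : ∀ k ∈ List.range (m + 1), pvContrib n p k = (fun (_ : Nat) => (0 : Int)) k := by
      intro k _; unfold pvContrib; rw [if_neg hg]
    rw [List.map_congr_left hfun]
    simp only [List.map_const', List.sum_replicate, smul_zero, List.length_range]
    rw [if_neg (show ¬ (pvS n p + 1 ≤ (m : Int) ∧ (m : Int) < pvE n p) by omega)]

def pvCov (n : Int) (l : List (Int × Int)) (m : Nat) : Int :=
  ((List.range m).map (fun (k : Nat) => pvDSpec n l k)).sum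

lemma cov_swap (n : Int) (l : List (Int × Int)) (m : Nat) :
    pvCov n l (m + 1)
      = (l.map (fun p => if pvS n p + 1 ≤ (m : Int) ∧ (m : Int) < pvE n p then (1 : Int) else 0)).sum := by
  induction l with
  | nil => simp [pvCov, pvDSpec]
  | cons p l ih =>
    have hfun : ∀ k ∈ List.range (m + 1),
        pvDSpec n (p :: l) k = pvContrib n p k + pvDSpec n l k := by
      intro k _; simp [pvDSpec]
    unfold pvCov
    rw [List.map_congr_left hfun, PySem.List.sum_map_add_int, sum_contrib_eq_ind n p m]
    unfold pvCov at ih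
    rw [ih]
    simp

lemma cov_pos_iff (n : Int) (l : List (Int × Int)) (m : Nat) :
    (0 < pvCov n l (m + 1)) ↔ pvIntB n l (m : Int) = true := by
  rw [cov_swap]
  induction l with
  | nil => simp [pvIntB]
  | cons p l ih =>
    have hnon : 0 ≤ (l.map (fun p =>
        if pvS n p + 1 ≤ (m : Int) ∧ (m : Int) < pvE n p then (1 : Int) else 0)).sum := by
      apply List.sum_nonneg
      intro x hx
      rcases List.mem_map.mp hx with ⟨q, _, hq⟩
      rw [← hq]
      split <;> omega
    simp only [List.map_cons, List.sum_cons]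
    unfold pvIntB
    simp only [List.any_cons]
    by_cases hc : pvS n p + 1 ≤ (m : Int) ∧ (m : Int) < pvE n p
    · rw [if_pos hc]
      simp only [hc]
      constructor
      · intro _; rfl
      · intro _; omega
    · rw [if_neg hc]
      simp only [hc, decide_false, Bool.false_or, zero_add]
      exact ih

lemma marksB_char (n : Int) (hn : 0 ≤ n) (spans : List (Int × Int)) :
    pvMarksB n (n + 1)
      (spans.foldl (pvStepB n) (List.replicate (n.toNat + 1) 0, PySem.Set.empty)).1
      (spans.foldl (pvStepB n) (List.replicate (n.toNat + 1) 0, PySem.Set.empty)).2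
      = (List.range n.toNat).map (fun (k : Nat) => pvSpec n (n + 1) spans (k : Int)) := by
  obtain ⟨hL, hD, hS⟩ := stateB_char n hn spans
  set diff := (spans.foldl (pvStepB n) (List.replicate (n.toNat + 1) 0, PySem.Set.empty)).1 with hdiff
  set starts := (spans.foldl (pvStepB n) (List.replicate (n.toNat + 1) 0, PySem.Set.empty)).2 with hstarts
  suffices h : ∀ m : Nat, (m : Int) ≤ n →
      ((PySem.List.pyRange 0 (m : Int) 1).foldl
        (fun (st : List Int × Int) i =>
          (st.1 ++ [if PySem.Set.contains starts i then n + 1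
                    else if 0 < st.2 + PySem.List.pyGetD diff i 0 then 1 else 0],
           st.2 + PySem.List.pyGetD diff i 0))
        ([], 0))
      = ((List.range m).map (fun (k : Nat) => pvSpec n (n + 1) spans (k : Int)), pvCov n spans m) by
    have hfin := h n.toNat (by omega)
    unfold pvMarksB
    rw [show PySem.List.pyRange 0 n 1 = PySem.List.pyRange 0 ((n.toNat : Nat) : Int) 1 by
      rw [Int.toNat_of_nonneg hn]]
    rw [hfin]
  intro m
  induction m with
  | zero =>
    intro _
    rw [Nat.cast_zero, PySem.List.pyRange_one_eq_nil le_rfl, List.foldl_nil]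
    simp [pvCov]
  | succ m ih =>
    intro hm1
    have hm' : (m : Int) ≤ n := by push_cast at hm1 ⊢; omega
    rw [show ((m + 1 : Nat) : Int) = (m : Int) + 1 by push_cast; ring,
        PySem.List.pyRange_one_succ_right (Int.natCast_nonneg m),
        List.foldl_append, ih hm', List.foldl_cons, List.foldl_nil]
    have hdm : PySem.List.pyGetD diff ((m : Nat) : Int) 0 = pvDSpec n spans m := by
      rw [PySem.List.pyGetD_natCast]; exact hD m
    have hcov' : pvCov n spans m + pvDSpec n spans m = pvCov n spans (m + 1) := by
      unfold pvCov
      rw [List.range_succ, List.map_append, List.sum_append]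
      simp
    have hentry : (if PySem.Set.contains starts ((m : Nat) : Int) then n + 1
        else if 0 < pvCov n spans m + PySem.List.pyGetD diff ((m : Nat) : Int) 0 then (1 : Int) else 0)
        = pvSpec n (n + 1) spans ((m : Nat) : Int) := by
      rw [hdm, hcov', hS ((m : Nat) : Int)]
      unfold pvSpec
      cases hSB : pvStartB n spans ((m : Nat) : Int)
      · simp only [Bool.false_eq_true, if_false]
        rw [if_congr (cov_pos_iff n spans m) rfl rfl]
      · simp
    rw [List.range_succ, List.map_append]
    simp only [Prod.mk.injEq, List.map_cons, List.map_nil]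
    refine ⟨?_, ?_⟩
    · exact congrArg
        (fun z => List.map (fun (k : Nat) => pvSpec n (n + 1) spans (k : Int)) (List.range m) ++ [z])
        hentry
    · rw [hdm]; exact hcov'

-- ===== VERDICT (by name: the statement is the Claim_ definition above) =====
theorem build_negative_unit_index_spec : Claim_equal_build_negative_unit_index := by
  intro uc spans _
  unfold Spec_build_negative_unit_index
  simp only [build_negative_unit_index, build_negative_unit_index_alt]
  have hn : (0 : Int) ≤ max 0 uc := le_max_left _ _
  rw [marksA_char (max 0 uc) hn spans, marksB_char (max 0 uc) hn spans]
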